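-- pv_equiv track=rewrite | github.com/Morsalin012/Compiler-design | Lab04.py | operator_placement_validation
-- ===== SOURCE A (Python) =====
-- def operator_placement_validation(expr):
--     expr = expr.replace(" ", "")
--     ops = "+-*/"
--
--     # cannot start or end with operator
--     if expr[0] in ops or expr[-1] in ops:
--         return False
--
--     # cannot have two operators next to each other
--     for i in range(len(expr)-1):
--         if expr[i] in ops and expr[i+1] in ops:
--             return False
--
--     # cannot have ) after operator
--     for i in range(len(expr)-1):
--         if expr[i] in ops and expr[i+1] == ')':
--             return False
--
--     return True
-- ===== SOURCE B (Python) =====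
-- def operator_placement_validation(expr):
--     s = expr.replace(" ", "")
--     if not s:
--         return False
--     segs = s.translate(str.maketrans("+-*/", "\0\0\0\0")).split("\0")
--     return all(segs) and not any(seg.startswith(")") for seg in segs[1:])
-- ===== Notes on version B (the rewrite author's own statement) =====
-- stated objective: faster
-- what changed: B splits the space-stripped string into the segments delimited by operator characters (translate operators to NUL, then split) and judges the segment list -- every segment nonempty and no segment after the first beginning with a close parenthesis -- instead of A's positional first/last checks and two index-based adjacent-pair loops. The segment pass runs in C-level str.translate/str.split instead of per-index Python loops.
import Mathlib
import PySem

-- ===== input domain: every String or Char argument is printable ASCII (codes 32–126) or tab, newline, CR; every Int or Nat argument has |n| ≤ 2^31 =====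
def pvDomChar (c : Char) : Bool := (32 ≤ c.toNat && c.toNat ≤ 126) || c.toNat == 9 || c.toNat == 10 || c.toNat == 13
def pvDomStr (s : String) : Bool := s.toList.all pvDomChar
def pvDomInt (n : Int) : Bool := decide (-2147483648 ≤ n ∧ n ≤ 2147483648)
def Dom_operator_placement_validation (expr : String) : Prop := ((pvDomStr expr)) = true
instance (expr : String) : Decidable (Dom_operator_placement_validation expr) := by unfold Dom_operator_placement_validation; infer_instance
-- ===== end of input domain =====

-- B splits the space-stripped string into operator-delimited segments (translate ops to NUL, split)
-- and judges the segment list, instead of A's first/last checks plus two adjacent-pair index loops;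
-- B returns False where A raises IndexError on all-space input.

-- ===== PORT A =====
-- the operator set "+-*/" (module constant of both Pythons)
def pyOps : List Char := ['+', '-', '*', '/']

def operator_placement_validation (expr : String) : Bool :=
  let s := (PySem.Str.replace expr " " "").toList
  match PySem.List.pyGet? s 0, PySem.List.pyGet? s (-1) with
  | some c0, some cn =>
    if c0 ∈ pyOps ∨ cn ∈ pyOps then false
    else if (List.range (s.length - 1)).any
        (fun i => decide (s.getD i ' ' ∈ pyOps) && decide (s.getD (i+1) ' ' ∈ pyOps)) then false
    else if (List.range (s.length - 1)).any
        (fun i => decide (s.getD i ' ' ∈ pyOps) && (s.getD (i+1) ' ' == ')')) then false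
    else true
  | _, _ => false  -- unreachable under Pre_: Python raises IndexError here

-- ===== PORT B =====
-- hand port of str.split('\x00') on a single one-char separator (exact for that call)
def splitNul : List Char → List (List Char)
  | [] => [[]]
  | c :: t =>
    match splitNul t with
    | s :: r => if c == '\x00' then [] :: s :: r else (c :: s) :: r
    | [] => [[]]

def operator_placement_validation_alt (expr : String) : Bool :=
  let s := (PySem.Str.replace expr " " "").toList
  if s.isEmpty then false
  else
    -- translate "+-*/" to NUL, split on NUL
    let segs := splitNul (s.map (fun c => if c ∈ pyOps then '\x00' else c))
    segs.all (fun seg => !seg.isEmpty)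
      && !((segs.drop 1).any (fun seg => seg.headD ' ' == ')'))

-- ===== PRECONDITION & SPEC =====
-- Pre_ excludes exactly the inputs that become empty after removing spaces: there A raises IndexError.
def Pre_operator_placement_validation (expr : String) : Prop :=
  (PySem.Str.replace expr " " "").toList ≠ []
instance (expr : String) : Decidable (Pre_operator_placement_validation expr) := by
  unfold Pre_operator_placement_validation; infer_instance

def pvWitness_operator_placement_validation : String := "1+2"

def Spec_operator_placement_validation (expr : String) (out : Bool) : Prop :=
  out = operator_placement_validation_alt expr
instance (expr : String) (out : Bool) : Decidable (Spec_operator_placement_validation expr out) := by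
  unfold Spec_operator_placement_validation; infer_instance

-- ===== CLAIM =====
def Claim_equal_operator_placement_validation : Prop :=
  ∀ (expr : String), Dom_operator_placement_validation expr →
    Pre_operator_placement_validation expr →
    Spec_operator_placement_validation expr (operator_placement_validation expr)

-- ===== LEMMAS AND PROOFS =====

-- no char of replace(expr, " ", "") is NUL when expr is in Dom (needed to read the translate/split back)
theorem go_mem : ∀ (fuel : Nat) (l acc : List Char) (x : Char),
    x ∈ PySem.Chars.replace.go [' '] [] fuel l acc → x ∈ acc ∨ x ∈ l := by
  intro fuel
  induction fuel with
  | zero =>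
    intro l acc x h
    simp [PySem.Chars.replace.go] at h
    rcases h with h | h
    · exact .inl h
    · exact .inr h
  | succ n ih =>
    intro l acc x h
    cases l with
    | nil => simp [PySem.Chars.replace.go] at h; exact .inl h
    | cons c t =>
      rw [show PySem.Chars.replace.go [' '] [] (n+1) (c :: t) acc =
          (if [' '].isPrefixOf (c :: t) = true
           then PySem.Chars.replace.go [' '] [] n (List.drop 1 (c :: t)) ([].reverse ++ acc)
           else PySem.Chars.replace.go [' '] [] n t (c :: acc)) from rfl] at h
      split at h
      · rcases ih _ _ _ h with h | h
        · exact .inl h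
        · exact .inr (List.mem_cons_of_mem _ h)
      · rcases ih _ _ _ h with h | h
        · rcases List.mem_cons.1 h with h | h
          · exact .inr (by simp [h])
          · exact .inl h
        · exact .inr (List.mem_cons_of_mem _ h)

theorem mem_replace_space {l : List Char} {x : Char}
    (h : x ∈ PySem.Chars.replace l [' '] []) : x ∈ l := by
  have := go_mem l.length l [] x (by simpa [PySem.Chars.replace] using h)
  simpa using this

-- adjacency scan in structural form (characterises A's two range-loops)
def pairsAny (q : Char → Char → Bool) : List Char → Bool
  | a :: b :: t => q a b || pairsAny q (b :: t)
  | _ => false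

theorem range_any_eq_pairsAny (q : Char → Char → Bool) :
    ∀ s : List Char,
      (List.range (s.length - 1)).any (fun i => q (s.getD i ' ') (s.getD (i+1) ' ')) = pairsAny q s
  | [] => by simp [pairsAny]
  | [a] => by simp [pairsAny]
  | a :: b :: t => by
    have ih := range_any_eq_pairsAny q (b :: t)
    simp only [List.length_cons, Nat.add_sub_cancel] at ih ⊢
    rw [List.range_succ_eq_map, List.any_cons, List.any_map]
    simp only [List.getD_cons_succ] at ih
    simp only [Function.comp_def, List.getD_cons_succ, List.getD_cons_zero]
    rw [ih]
    rfl

theorem pairsAny_or (q1 q2 : Char → Char → Bool) :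
    ∀ s : List Char, pairsAny (fun x y => q1 x y || q2 x y) s = (pairsAny q1 s || pairsAny q2 s)
  | [] => rfl
  | [_] => rfl
  | a :: b :: t => by
    simp only [pairsAny]
    rw [pairsAny_or q1 q2 (b :: t)]
    cases q1 a b <;> cases q2 a b <;> cases pairsAny q1 (b :: t) <;> cases pairsAny q2 (b :: t) <;> rfl

-- structural model of B's translate-then-split on a NUL-free string
def segments : List Char → List (List Char)
  | [] => [[]]
  | c :: t =>
    if c ∈ pyOps then [] :: segments t
    else
      match segments t with
      | s :: r => (c :: s) :: r
      | [] => [[]]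

theorem segments_ne_nil : ∀ s : List Char, segments s ≠ []
  | [] => by simp [segments]
  | c :: t => by
    simp only [segments]
    split
    · simp
    · cases h : segments t with
      | nil => simp
      | cons s r => simp

theorem splitNul_map_eq_segments :
    ∀ s : List Char, (∀ c ∈ s, c ≠ '\x00') →
      splitNul (s.map (fun c => if c ∈ pyOps then '\x00' else c)) = segments s
  | [], _ => rfl
  | c :: t, h => by
    have ih := splitNul_map_eq_segments t (fun x hx => h x (List.mem_cons_of_mem _ hx))
    simp only [List.map_cons, splitNul, segments, ih]
    by_cases hc : c ∈ pyOps
    · simp only [if_pos hc]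
      cases hseg : segments t with
      | nil => exact absurd hseg (segments_ne_nil t)
      | cons s r => simp
    · have hcnul : c ≠ '\x00' := h c (List.mem_cons_self ..)
      simp only [if_neg hc]
      cases hseg : segments t with
      | nil => exact absurd hseg (segments_ne_nil t)
      | cons s r => simp [hcnul]

-- first segment of `segments s`
theorem seg_head_empty : ∀ s : List Char,
    ((segments s).headD []).isEmpty = (s.isEmpty || decide (s.headD ' ' ∈ pyOps))
  | [] => by simp [segments]
  | c :: t => by
    simp only [segments]
    by_cases hc : c ∈ pyOps
    · simp [hc]
    · simp only [if_neg hc]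
      cases hseg : segments t with
      | nil => exact absurd hseg (segments_ne_nil t)
      | cons s r => simp [hc]

theorem seg_head_head : ∀ s : List Char,
    ((segments s).headD []).headD ' '
      = if s.isEmpty || decide (s.headD ' ' ∈ pyOps) then ' ' else s.headD ' '
  | [] => by simp [segments]
  | c :: t => by
    simp only [segments]
    by_cases hc : c ∈ pyOps
    · simp [hc]
    · simp only [if_neg hc]
      cases hseg : segments t with
      | nil => exact absurd hseg (segments_ne_nil t)
      | cons s r => simp [hc]

-- the tail of the segment list carries exactly A's three after-an-operator conditions
theorem seg_tail_characterisation : ∀ s : List Char,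
    ((segments s).drop 1).all (fun seg => !seg.isEmpty && !(seg.headD ' ' == ')'))
      = (!pairsAny (fun x y => decide (x ∈ pyOps) && (decide (y ∈ pyOps) || y == ')')) s
          && !(decide (s.getLastD ' ' ∈ pyOps)))
  | [] => by simp [segments, pairsAny, pyOps]
  | c :: t => by
    have ih := seg_tail_characterisation t
    by_cases hc : c ∈ pyOps
    · simp only [segments, if_pos hc]
      cases t with
      | nil => simp [segments, pairsAny, hc]
      | cons h t' =>
        have hne := seg_head_empty (h :: t')
        have hhd := seg_head_head (h :: t')
        cases hseg : segments (h :: t') with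
        | nil => exact absurd hseg (segments_ne_nil _)
        | cons s0 r =>
          rw [hseg] at hne hhd ih
          simp only [List.drop_one, List.tail_cons, List.all_cons] at ih ⊢
          simp only [List.headD_cons, List.isEmpty_cons, List.getLastD_cons] at hne hhd ih ⊢
          rw [show pairsAny (fun x y => decide (x ∈ pyOps) && (decide (y ∈ pyOps) || y == ')')) (c :: h :: t')
              = ((decide (c ∈ pyOps) && (decide (h ∈ pyOps) || h == ')'))
                  || pairsAny (fun x y => decide (x ∈ pyOps) && (decide (y ∈ pyOps) || y == ')')) (h :: t')) from rfl]
          rw [hne, hhd, ih]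
          by_cases hh : h ∈ pyOps
          · simp [hh, hc]
          · by_cases hp : h = ')'
            · simp [hp, hc]
            · simp [hh, hc, Bool.and_assoc]
    · simp only [segments, if_neg hc]
      cases hseg : segments t with
      | nil => exact absurd hseg (segments_ne_nil t)
      | cons s0 r =>
        rw [hseg] at ih
        simp only [List.drop_one, List.tail_cons] at ih ⊢
        cases t with
        | nil =>
          simp only [segments] at hseg
          cases hseg
          simp [pairsAny, hc]
        | cons h t' =>
          rw [show pairsAny (fun x y => decide (x ∈ pyOps) && (decide (y ∈ pyOps) || y == ')')) (c :: h :: t')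
              = ((decide (c ∈ pyOps) && (decide (h ∈ pyOps) || h == ')'))
                  || pairsAny (fun x y => decide (x ∈ pyOps) && (decide (y ∈ pyOps) || y == ')')) (h :: t')) from rfl]
          simp only [List.headD_eq_head?_getD, List.getLastD_eq_getLast?] at ih
          simp [hc, ih]

theorem all_and_split (l : List (List Char)) :
    l.all (fun seg => !seg.isEmpty && !(seg.headD ' ' == ')'))
      = (l.all (fun seg => !seg.isEmpty) && !(l.any (fun seg => seg.headD ' ' == ')'))) := by
  induction l with
  | nil => rfl
  | cons s r ih =>
    simp only [List.all_cons, List.any_cons, ih]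
    cases s.isEmpty <;> cases (s.headD ' ' == ')') <;>
      cases r.all (fun seg => !seg.isEmpty) <;> cases r.any (fun seg => seg.headD ' ' == ')') <;> rfl

-- ===== VERDICT =====
theorem operator_placement_validation_spec : Claim_equal_operator_placement_validation := by
  intro expr hdom hpre
  unfold Spec_operator_placement_validation
  unfold operator_placement_validation operator_placement_validation_alt
  unfold Pre_operator_placement_validation at hpre
  have hnul : ∀ c ∈ (PySem.Str.replace expr " " "").toList, c ≠ '\x00' := by
    intro c hc
    have hc' : c ∈ expr.toList := by
      have : (PySem.Str.replace expr " " "").toList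
          = PySem.Chars.replace expr.toList [' '] [] := by
        simp [pysem]
      rw [this] at hc
      exact mem_replace_space hc
    have := List.all_eq_true.1 hdom c hc'
    simp only [pvDomChar] at this
    intro h
    subst h
    simp at this
  set s := (PySem.Str.replace expr " " "").toList with hs
  clear_value s
  obtain ⟨a, t, rfl⟩ := List.exists_cons_of_ne_nil hpre
  have hz : (a :: t).getLast? = some ((a :: t).getLastD ' ') := by
    rw [List.getLastD_eq_getLast?]
    cases hzz : (a :: t).getLast? with
    | none => simp at hzz
    | some z => rfl
  have hget0 : PySem.List.pyGet? (a :: t) (0 : Int) = some a := by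
    simp [PySem.List.pyGet?, PySem.List.pyIdx?]
  simp only [hget0, PySem.List.pyGet?_neg_one, hz, List.isEmpty_cons, Bool.false_eq_true,
    if_false]
  rw [splitNul_map_eq_segments (a :: t) hnul]
  -- split B's segment list into head segment and tail
  have hsegs : segments (a :: t)
      = ((segments (a :: t)).headD []) :: ((segments (a :: t)).drop 1) := by
    cases hseg : segments (a :: t) with
    | nil => exact absurd hseg (segments_ne_nil _)
    | cons s0 r => simp
  rw [hsegs]
  simp only [List.all_cons, List.drop_one, List.tail_cons]
  have h1 := seg_head_empty (a :: t)
  simp only [List.isEmpty_cons, List.headD_cons, Bool.false_or] at h1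
  have h3 := seg_tail_characterisation (a :: t)
  rw [List.drop_one, all_and_split] at h3
  rw [range_any_eq_pairsAny (fun x y => decide (x ∈ pyOps) && decide (y ∈ pyOps)),
      range_any_eq_pairsAny (fun x y => decide (x ∈ pyOps) && (y == ')'))]
  have hq : (fun (x y : Char) => decide (x ∈ pyOps) && (decide (y ∈ pyOps) || y == ')'))
      = fun x y => (decide (x ∈ pyOps) && decide (y ∈ pyOps))
          || (decide (x ∈ pyOps) && (y == ')')) := by
    funext x y
    simp [Bool.and_or_distrib_left]
  rw [hq, pairsAny_or] at h3
  rw [h1]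
  simp only [List.getLastD_eq_getLast?] at h3 ⊢
  set T := (segments (a :: t)).tail with hT
  clear_value T
  clear hs hsegs hz hget0 hdom hpre hnul h1 hq hT
  set P1 := pairsAny (fun x y => decide (x ∈ pyOps) && decide (y ∈ pyOps)) (a :: t) with hP1
  set P2 := pairsAny (fun x y => decide (x ∈ pyOps) && (y == ')')) (a :: t) with hP2
  clear_value P1 P2
  clear hP1 hP2
  by_cases ha : a ∈ pyOps <;>
    by_cases hl : (a :: t).getLast?.getD ' ' ∈ pyOps <;>
      cases P1 <;> cases P2 <;>
        cases hA : T.all (fun seg => !seg.isEmpty) <;>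
          cases hB : T.any (fun seg => seg.headD ' ' == ')') <;>
            first
              | (simp [ha, hl, hA, hB]; done)
              | (exfalso; rw [hA, hB] at h3; simp [ha, hl] at h3; done)
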